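-- pv_equiv track=rewrite | github.com/marcs-feh/mkmenu | mkmenu.py | linedepth
-- ===== SOURCE A (Python) =====
-- def linedepth(line:str) -> int:
--     depth = 0
--     for char in line:
--         if char == ' ':
--             depth += 1
--         else:
--             break
--
--     return depth // 2
-- ===== SOURCE B (Python) =====
-- def linedepth(line: str) -> int:
--     # Depth = number of complete leading two-space pairs: consume "  " pairs
--     # recursively; no counting loop and no division needed.
--     if line.startswith('  '):
--         return 1 + linedepth(line[2:])
--     return 0
-- ===== Notes on version B (the rewrite author's own statement) =====
-- stated objective: alternative
-- what changed: Instead of counting all leading spaces and floor-dividing by 2, B recursively consumes leading two-space pairs, adding 1 per pair, so no counter and no division occur.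
import Mathlib
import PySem

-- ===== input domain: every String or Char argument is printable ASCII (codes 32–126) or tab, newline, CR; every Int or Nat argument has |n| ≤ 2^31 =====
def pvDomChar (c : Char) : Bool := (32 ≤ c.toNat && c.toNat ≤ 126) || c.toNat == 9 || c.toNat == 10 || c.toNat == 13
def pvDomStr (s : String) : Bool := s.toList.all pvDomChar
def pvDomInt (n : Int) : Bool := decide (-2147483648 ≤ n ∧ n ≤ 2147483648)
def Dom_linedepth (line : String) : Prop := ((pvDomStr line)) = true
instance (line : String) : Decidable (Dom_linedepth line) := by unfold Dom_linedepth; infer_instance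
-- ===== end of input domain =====

-- B consumes leading two-space pairs recursively (1 per pair) instead of counting spaces and dividing by 2 (alternative decomposition; same cost).


-- ===== PORT A =====
-- the for-loop with break: walk the characters, add 1 per leading space, stop at the first non-space
def linedepthLoop (depth : Int) : List Char → Int
  | [] => depth
  | c :: rest => if c == ' ' then linedepthLoop (depth + 1) rest else depth

def linedepth (line : String) : Int :=
  PySem.Int.floordiv (linedepthLoop 0 line.toList) 2

-- ===== PORT B =====
-- line.startswith('  ') then 1 + linedepth(line[2:]): recursion eating one two-space pair at a time
def linedepthAltRec : List Char → Int
  | ' ' :: ' ' :: rest => 1 + linedepthAltRec rest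
  | _ => 0

def linedepth_alt (line : String) : Int :=
  linedepthAltRec line.toList

-- ===== PRECONDITION & SPEC =====
def Spec_linedepth (line : String) (out : Int) : Prop := out = linedepth_alt line
instance (line : String) (out : Int) : Decidable (Spec_linedepth line out) := by unfold Spec_linedepth; infer_instance

-- ===== CLAIM (what is proved, stated in full; the proofs are below) =====
def Claim_equal_linedepth : Prop := ∀ (line : String), Dom_linedepth line → Spec_linedepth line (linedepth line)

-- ===== LEMMAS AND PROOFS =====
theorem linedepthLoop_shift (l : List Char) : ∀ d : Int,
    linedepthLoop d l = d + linedepthLoop 0 l := by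
  induction l with
  | nil => intro d; simp [linedepthLoop]
  | cons c rest ih =>
    intro d
    by_cases h : c == ' '
    · simp only [linedepthLoop, h, if_pos]
      rw [ih (d + 1), ih (0 + 1)]
      ring
    · simp [linedepthLoop, h]

theorem linedepthLoop_nonneg (l : List Char) : 0 ≤ linedepthLoop 0 l := by
  induction l with
  | nil => simp [linedepthLoop]
  | cons c rest ih =>
    by_cases h : c == ' '
    · simp only [linedepthLoop, h, if_pos]
      rw [linedepthLoop_shift]
      omega
    · simp [linedepthLoop, h]

theorem main_eq (l : List Char) :
    PySem.Int.floordiv (linedepthLoop 0 l) 2 = linedepthAltRec l := by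
  match l with
  | [] => decide
  | [c] =>
    by_cases h : c == ' '
    · have hc : c = ' ' := by exact (beq_iff_eq.mp h)
      subst hc; decide
    · have hc : c ≠ ' ' := by simpa using h
      simp [linedepthLoop, linedepthAltRec, hc]
  | c₁ :: c₂ :: rest =>
    by_cases h1 : c₁ = ' '
    · by_cases h2 : c₂ = ' '
      · subst h1; subst h2
        have ih := main_eq rest
        simp only [linedepthLoop, if_pos (by decide : (' ' == ' ') = true)]
        rw [linedepthLoop_shift, linedepthLoop_shift]
        have hnn := linedepthLoop_nonneg rest
        rw [show (0:Int) + 1 + 1 + (0 + linedepthLoop 0 rest) = linedepthLoop 0 rest + 2 by ring,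
          show linedepthAltRec (' ' :: ' ' :: rest) = 1 + linedepthAltRec rest from rfl]
        rw [PySem.Int.floordiv_eq_ediv_of_pos (by omega)] at *
        omega
      · subst h1
        simp only [linedepthLoop, if_pos (by decide : (' ' == ' ') = true),
          if_neg (by simpa using h2 : ¬ (c₂ == ' ') = true)]
        have : linedepthAltRec (' ' :: c₂ :: rest) = 0 := by
          rw [linedepthAltRec.eq_def]
          split
          · rename_i heq; injection heq with _ h'; injection h' with hc2 _; exact absurd hc2 h2
          · rfl
        rw [this]; decide
    · have hA : linedepthLoop 0 (c₁ :: c₂ :: rest) = 0 := by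
        simp [linedepthLoop, show ¬ (c₁ == ' ') = true by simpa using h1]
      have hB : linedepthAltRec (c₁ :: c₂ :: rest) = 0 := by
        rw [linedepthAltRec.eq_def]
        split
        · rename_i heq; injection heq with hc1 _; exact absurd hc1 h1
        · rfl
      rw [hA, hB]; decide

-- ===== VERDICT (by name: the statement is the Claim_ definition above) =====
theorem linedepth_spec : Claim_equal_linedepth := by
  intro line _
  unfold Spec_linedepth linedepth linedepth_alt
  exact main_eq line.toList
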